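-- pv_equiv track=rewrite | github.com/sukhanovaxenia/AmyloidBench | amyloidbench/features/extraction.py | _find_stretches
-- ===== SOURCE A (Python) =====
-- def _find_stretches(
--
--     sequence: str,
--     residue_set: set,
--     min_length: int = 3
-- ) -> list[str]:
--     """Find stretches of consecutive residues from a given set."""
--     stretches = []
--     current_stretch = ""
--
--     for aa in sequence:
--         if aa in residue_set:
--             current_stretch += aa
--         else:
--             if len(current_stretch) >= min_length:
--                 stretches.append(current_stretch)
--             current_stretch = ""
--
--     if len(current_stretch) >= min_length:
--         stretches.append(current_stretch)
--
--     return stretches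
-- ===== SOURCE B (Python) =====
-- def _find_stretches(sequence, residue_set, min_length=3):
--     """Mark non-members with a separator, split on it, keep long pieces."""
--     SEP = "\x00"
--     delimited = "".join(aa if aa in residue_set else SEP for aa in sequence)
--     return [p for p in delimited.split(SEP) if len(p) >= min_length]
-- ===== Notes on version B (the rewrite author's own statement) =====
-- stated objective: idiomatic
-- what changed: Replaces A's manual current_stretch accumulator with reset/flush branches by mapping non-member residues to a separator character, splitting the string on it with str.split, and post-filtering the pieces by length.
import Mathlib
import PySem

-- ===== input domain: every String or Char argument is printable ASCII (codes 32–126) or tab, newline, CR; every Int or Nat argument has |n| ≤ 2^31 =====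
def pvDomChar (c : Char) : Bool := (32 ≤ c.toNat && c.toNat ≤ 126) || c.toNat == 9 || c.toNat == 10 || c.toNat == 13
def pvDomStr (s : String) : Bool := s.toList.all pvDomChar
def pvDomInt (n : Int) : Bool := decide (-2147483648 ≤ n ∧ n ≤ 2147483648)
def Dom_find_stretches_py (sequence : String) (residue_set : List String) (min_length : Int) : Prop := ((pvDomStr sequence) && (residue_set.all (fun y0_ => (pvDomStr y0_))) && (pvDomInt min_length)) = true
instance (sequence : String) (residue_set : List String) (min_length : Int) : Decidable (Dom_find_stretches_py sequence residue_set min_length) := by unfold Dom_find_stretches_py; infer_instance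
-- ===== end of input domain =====

-- B replaces A's manual accumulator with mark-separator / str.split / length-filter (idiomatic decomposition, same result).

-- ===== PORT A =====
-- state = (stretches, current_stretch); current_stretch kept as List Char (PySem convention: strings as char lists)
def find_stretches_py (sequence : String) (residue_set : List String) (min_length : Int) : List String :=
  let r := sequence.toList.foldl
    (fun (st : List String × List Char) (aa : Char) =>
      if residue_set.contains (String.mk [aa]) then
        (st.1, st.2 ++ [aa])
      else
        (if min_length ≤ (st.2.length : Int) then st.1 ++ [String.mk st.2] else st.1, []))
    ([], [])
  if min_length ≤ (r.2.length : Int) then r.1 ++ [String.mk r.2] else r.1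

-- ===== PORT B =====
-- delimited = "".join(aa if aa in residue_set else SEP for aa in sequence)         (built as List Char)
-- pieces    = delimited.split(SEP)                                                  (PySem.Chars.splitOn)
-- result    = [p for p in pieces if len(p) >= min_length]
def find_stretches_py_alt (sequence : String) (residue_set : List String) (min_length : Int) : List String :=
  let delimited : List Char :=
    sequence.toList.map (fun aa => if residue_set.contains (String.mk [aa]) then aa else '\x00')
  ((PySem.Chars.splitOn delimited ['\x00']).filter
    (fun p => decide (min_length ≤ (p.length : Int)))).map String.mk

-- ===== PRECONDITION & SPEC =====
def Spec_find_stretches_py (sequence : String) (residue_set : List String) (min_length : Int) (out : List String) : Prop := out = find_stretches_py_alt sequence residue_set min_length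
instance (sequence : String) (residue_set : List String) (min_length : Int) (out : List String) : Decidable (Spec_find_stretches_py sequence residue_set min_length out) := by unfold Spec_find_stretches_py; infer_instance

-- ===== CLAIM (what is proved, stated in full; the proofs are below) =====
def Claim_equal_find_stretches_py : Prop := ∀ (sequence : String) (residue_set : List String) (min_length : Int), Dom_find_stretches_py sequence residue_set min_length → Spec_find_stretches_py sequence residue_set min_length (find_stretches_py sequence residue_set min_length)

-- ===== LEMMAS AND PROOFS =====

-- reference single-character split: pre = current piece prefix
def pvSplit1 (d : Char) (pre : List Char) : List Char → List (List Char)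
  | [] => [pre]
  | c :: rest => if c = d then pre :: pvSplit1 d [] rest else pvSplit1 d (pre ++ [c]) rest

theorem pvSplitOn_go_single (d : Char) (l : List Char) : ∀ (fuel : Nat), l.length < fuel →
    ∀ (cur : List Char) (acc : List (List Char)),
    PySem.Chars.splitOn.go [d] fuel l cur acc = acc.reverse ++ pvSplit1 d cur.reverse l := by
  induction l with
  | nil =>
    intro fuel hf cur acc
    cases fuel with
    | zero => omega
    | succ f => simp [PySem.Chars.splitOn.go, pvSplit1]
  | cons c rest ih =>
    intro fuel hf cur acc
    cases fuel with
    | zero => simp at hf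
    | succ f =>
      have hf' : rest.length < f := by simpa using hf
      by_cases hcd : d = c
      · subst hcd
        rw [show PySem.Chars.splitOn.go [d] (f+1) (d :: rest) cur acc
              = PySem.Chars.splitOn.go [d] f rest [] (cur.reverse :: acc) by
            simp [PySem.Chars.splitOn.go, List.isPrefixOf]]
        rw [ih f hf' [] (cur.reverse :: acc)]
        simp [pvSplit1]
      · rw [show PySem.Chars.splitOn.go [d] (f+1) (c :: rest) cur acc
              = PySem.Chars.splitOn.go [d] f rest (c :: cur) acc by
            simp [PySem.Chars.splitOn.go, List.isPrefixOf, hcd]]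
        rw [ih f hf' (c :: cur) acc]
        simp only [pvSplit1]
        rw [if_neg (fun h => hcd h.symm)]
        simp

theorem pvSplitOn_single (d : Char) (l : List Char) :
    PySem.Chars.splitOn l [d] = pvSplit1 d [] l := by
  have := pvSplitOn_go_single d l (l.length + 1) (by omega) [] []
  simpa [PySem.Chars.splitOn] using this

-- the loop invariant: A's accumulator run equals B's split-filter over the remaining input
theorem pv_main (residue_set : List String) (min_length : Int) (cs : List Char)
    (hcs : ∀ c ∈ cs, c ≠ '\x00') : ∀ (st : List String) (cur : List Char),
    (let r := cs.foldl
      (fun (st : List String × List Char) (aa : Char) =>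
        if residue_set.contains (String.mk [aa]) then
          (st.1, st.2 ++ [aa])
        else
          (if min_length ≤ (st.2.length : Int) then st.1 ++ [String.mk st.2] else st.1, []))
      (st, cur)
     if min_length ≤ (r.2.length : Int) then r.1 ++ [String.mk r.2] else r.1)
    = st ++ ((pvSplit1 '\x00' cur
        (cs.map (fun aa => if residue_set.contains (String.mk [aa]) then aa else '\x00'))).filter
          (fun p => decide (min_length ≤ (p.length : Int)))).map String.mk := by
  induction cs with
  | nil =>
    intro st cur
    by_cases h : min_length ≤ (cur.length : Int) <;> simp [pvSplit1, h]
  | cons c cs ih =>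
    intro st cur
    have hc : c ≠ '\x00' := hcs c (by simp)
    have hcs' : ∀ x ∈ cs, x ≠ '\x00' := fun x hx => hcs x (by simp [hx])
    by_cases hm : String.mk [c] ∈ residue_set
    · simpa [hm, pvSplit1, hc] using ih hcs' st (cur ++ [c])
    · by_cases h : min_length ≤ (cur.length : Int)
      · simpa [hm, pvSplit1, h] using ih hcs' (st ++ [String.mk cur]) []
      · simpa [hm, pvSplit1, h] using ih hcs' st []

-- ===== VERDICT (by name: the statement is the Claim_ definition above) =====
theorem find_stretches_py_spec : Claim_equal_find_stretches_py := by
  intro sequence residue_set min_length hdom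
  unfold Spec_find_stretches_py find_stretches_py find_stretches_py_alt
  have hcs : ∀ c ∈ sequence.toList, c ≠ '\x00' := by
    have hall : pvDomStr sequence = true := by
      unfold Dom_find_stretches_py at hdom; simp at hdom; exact hdom.1.1
    intro c hc hceq
    have := (List.all_eq_true.mp (by simpa [pvDomStr] using hall)) c hc
    subst hceq
    simp [pvDomChar] at this
  simpa [pvSplitOn_single] using pv_main residue_set min_length sequence.toList hcs [] []
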